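-- pv_equiv track=rewrite | github.com/benbel/24ri | src/generate_webpage.py | find_sentence_index
-- ===== SOURCE A (Python) =====
-- def find_sentence_index(sentences: list[str], place_sentence: str) -> int:
--     """Find which sentence index contains this place's sentence."""
--     # Try exact match first
--     for i, s in enumerate(sentences):
--         if place_sentence.strip() in s or s in place_sentence.strip():
--             return i
--     # Fallback: find by overlap
--     place_words = set(place_sentence.split())
--     best_idx = 0
--     best_overlap = 0
--     for i, s in enumerate(sentences):
--         sent_words = set(s.split())
--         overlap = len(place_words & sent_words)
--         if overlap > best_overlap:
--             best_overlap = overlap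
--             best_idx = i
--     return best_idx
-- ===== SOURCE B (Python) =====
-- def find_sentence_index(sentences: list[str], place_sentence: str) -> int:
--     """Fused single pass: exact-match check and overlap tracking in one loop."""
--     place_strip = place_sentence.strip()
--     place_words = set(place_sentence.split())
--     best_idx = 0
--     best_overlap = 0
--     for i, s in enumerate(sentences):
--         if place_strip in s or s in place_strip:
--             return i
--         overlap = len(place_words & set(s.split()))
--         if overlap > best_overlap:
--             best_overlap = overlap
--             best_idx = i
--     return best_idx
-- ===== Notes on version B (the rewrite author's own statement) =====
-- stated objective: alternative
-- what changed: B fuses A's two sequential passes (first the substring-match scan, then the word-overlap argmax scan) into one traversal that precomputes place_sentence.strip() and the word set once and returns early on a substring match.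
import Mathlib
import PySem

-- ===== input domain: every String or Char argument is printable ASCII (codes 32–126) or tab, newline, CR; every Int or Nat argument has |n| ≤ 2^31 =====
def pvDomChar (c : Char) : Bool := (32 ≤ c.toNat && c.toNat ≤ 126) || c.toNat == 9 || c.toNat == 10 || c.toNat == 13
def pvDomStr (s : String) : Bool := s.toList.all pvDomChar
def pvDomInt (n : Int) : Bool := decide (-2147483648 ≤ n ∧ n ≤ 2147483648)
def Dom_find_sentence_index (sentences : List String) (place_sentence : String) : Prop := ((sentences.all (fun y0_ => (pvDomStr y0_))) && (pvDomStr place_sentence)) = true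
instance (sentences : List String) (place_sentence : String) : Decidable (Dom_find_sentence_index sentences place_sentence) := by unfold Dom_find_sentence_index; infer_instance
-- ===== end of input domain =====

-- B fuses A's two sequential passes into one traversal (same results; constant-factor change only).

-- ===== PORT A =====
-- first for-loop: return the index of the first substring match, if any
def fsiMatchLoop (sentences : List String) (ps : String) (i : Int) : Option Int :=
  match sentences with
  | [] => none
  | s :: rest =>
      if PySem.Str.isIn (PySem.Str.strip ps) s || PySem.Str.isIn s (PySem.Str.strip ps) then some i
      else fsiMatchLoop rest ps (i + 1)

-- second for-loop: best_idx / best_overlap accumulator over the word sets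
def fsiOverlapLoop (sentences : List String) (placeWords : PySem.Set String)
    (i : Int) (bestIdx : Int) (bestOverlap : Int) : Int :=
  match sentences with
  | [] => bestIdx
  | s :: rest =>
      let overlap := PySem.Set.len (PySem.Set.inter placeWords (PySem.Set.ofList (PySem.Str.split₀ s)))
      if overlap > bestOverlap then fsiOverlapLoop rest placeWords (i + 1) i overlap
      else fsiOverlapLoop rest placeWords (i + 1) bestIdx bestOverlap

def find_sentence_index (sentences : List String) (place_sentence : String) : Int :=
  match fsiMatchLoop sentences place_sentence 0 with
  | some i => i
  | none =>
      let placeWords := PySem.Set.ofList (PySem.Str.split₀ place_sentence)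
      fsiOverlapLoop sentences placeWords 0 0 0

-- ===== PORT B =====
-- single fused loop: early return on substring match, else maintain the overlap argmax
def fsiFusedLoop (sentences : List String) (placeStrip : String) (placeWords : PySem.Set String)
    (i : Int) (bestIdx : Int) (bestOverlap : Int) : Int :=
  match sentences with
  | [] => bestIdx
  | s :: rest =>
      if PySem.Str.isIn placeStrip s || PySem.Str.isIn s placeStrip then i
      else
        let overlap := PySem.Set.len (PySem.Set.inter placeWords (PySem.Set.ofList (PySem.Str.split₀ s)))
        if overlap > bestOverlap then fsiFusedLoop rest placeStrip placeWords (i + 1) i overlap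
        else fsiFusedLoop rest placeStrip placeWords (i + 1) bestIdx bestOverlap

def find_sentence_index_alt (sentences : List String) (place_sentence : String) : Int :=
  fsiFusedLoop sentences (PySem.Str.strip place_sentence)
    (PySem.Set.ofList (PySem.Str.split₀ place_sentence)) 0 0 0

-- ===== PRECONDITION & SPEC =====
def Spec_find_sentence_index (sentences : List String) (place_sentence : String) (out : Int) : Prop := out = find_sentence_index_alt sentences place_sentence
instance (sentences : List String) (place_sentence : String) (out : Int) : Decidable (Spec_find_sentence_index sentences place_sentence out) := by unfold Spec_find_sentence_index; infer_instance

-- ===== CLAIM (what is proved, stated in full; the proofs are below) =====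
def Claim_equal_find_sentence_index : Prop := ∀ (sentences : List String) (place_sentence : String), Dom_find_sentence_index sentences place_sentence → Spec_find_sentence_index sentences place_sentence (find_sentence_index sentences place_sentence)

-- ===== LEMMAS AND PROOFS =====

-- the fused loop equals "first-match index, else the overlap argmax", for every accumulator state
theorem fsiFused_eq (sentences : List String) (ps : String) (pw : PySem.Set String) :
    ∀ (i bi bo : Int),
      fsiFusedLoop sentences (PySem.Str.strip ps) pw i bi bo =
        match fsiMatchLoop sentences ps i with
        | some j => j
        | none => fsiOverlapLoop sentences pw i bi bo := by
  induction sentences with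
  | nil => intro i bi bo; rfl
  | cons s rest ih =>
      intro i bi bo
      simp only [fsiFusedLoop, fsiMatchLoop, fsiOverlapLoop]
      split_ifs with h hov <;> first | rfl | exact ih _ _ _

-- ===== VERDICT (by name: the statement is the Claim_ definition above) =====
theorem find_sentence_index_spec : Claim_equal_find_sentence_index := by
  intro sentences place_sentence _
  unfold Spec_find_sentence_index find_sentence_index find_sentence_index_alt
  rw [fsiFused_eq]
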